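-- pv_equiv track=rewrite | github.com/alessio-ca/advent_of_code | 2021/19/main.py | _mapping_vector_to_matrix
-- ===== SOURCE A (Python) =====
-- from typing import Dict, List, Set, Tuple
--
-- def _mapping_vector_to_matrix(n: int) -> Dict[int, Tuple[int, int]]:
--     """Create mapping dictionary between vector and matrix representation of
--     distance pairs in a N-dimensional array"""
--     dict_pairs = {}
--     n_pairs = n * (n - 1) // 2
--     k = 0
--     j = 1
--     for i in range(n_pairs):
--         dict_pairs[i] = (k, j)
--         j += 1
--         if j == n:
--             k += 1
--             j = k + 1
--
--     return dict_pairs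
-- ===== SOURCE B (Python) =====
-- from typing import Dict, Tuple
--
--
-- def _mapping_vector_to_matrix(n: int) -> Dict[int, Tuple[int, int]]:
--     """Create mapping dictionary between vector and matrix representation of
--     distance pairs in a N-dimensional array"""
--     dict_pairs = {}
--     i = 0
--     for k in range(n):
--         for j in range(k + 1, n):
--             dict_pairs[i] = (k, j)
--             i += 1
--     return dict_pairs
-- ===== Notes on version B (the rewrite author's own statement) =====
-- stated objective: simpler
-- what changed: The flat loop over range(n*(n-1)//2) driving a (k, j) state machine with a reset branch is replaced by two plain nested loops over k and j with a running counter, with no pair-count formula and no branch.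
-- outside the precondition, e.g. on _mapping_vector_to_matrix(-3): A returns {0: (0, 1), 1: (0, 2), 2: (0, 3), 3: (0, 4), 4: (0, 5), 5: (0, 6)}, B returns {}
import Mathlib
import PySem

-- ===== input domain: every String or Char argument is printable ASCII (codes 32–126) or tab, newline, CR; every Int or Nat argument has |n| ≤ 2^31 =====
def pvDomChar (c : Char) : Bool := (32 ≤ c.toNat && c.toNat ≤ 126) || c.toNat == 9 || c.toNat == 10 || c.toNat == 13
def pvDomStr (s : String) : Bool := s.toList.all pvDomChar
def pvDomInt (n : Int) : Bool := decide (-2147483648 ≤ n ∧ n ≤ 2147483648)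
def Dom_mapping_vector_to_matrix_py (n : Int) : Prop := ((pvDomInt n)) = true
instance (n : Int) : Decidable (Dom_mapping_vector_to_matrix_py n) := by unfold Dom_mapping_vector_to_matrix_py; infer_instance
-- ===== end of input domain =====

-- B replaces A's flat loop-with-state-machine over range(n*(n-1)//2) by two plain
-- nested loops over k and j with a running counter (objective: simpler).

-- ===== PORT A =====
-- A's loop body: state (dict_pairs, k, j); the key i comes from the range.
def aStep (n : Int) (s : PySem.Dict Int (Int × Int) × Int × Int) (i : Int) :
    PySem.Dict Int (Int × Int) × Int × Int :=
  let d := s.1.insert i (s.2.1, s.2.2)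
  let j := s.2.2 + 1
  if j = n then (d, s.2.1 + 1, s.2.1 + 2) else (d, s.2.1, j)

def mapping_vector_to_matrix_py (n : Int) : List (Int × Int × Int) :=
  ((PySem.List.pyRange 0 (PySem.Int.floordiv (n * (n - 1)) 2) 1).foldl
      (aStep n) (PySem.Dict.empty, 0, 1)).1.items

-- ===== PORT B =====
-- B's inner loop body: state (dict_pairs, i).
def bInner (k : Int) (t : PySem.Dict Int (Int × Int) × Int) (j : Int) :
    PySem.Dict Int (Int × Int) × Int :=
  (t.1.insert t.2 (k, j), t.2 + 1)

-- B's outer loop body: run the inner loop over range(k+1, n).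
def bOuter (n : Int) (s : PySem.Dict Int (Int × Int) × Int) (k : Int) :
    PySem.Dict Int (Int × Int) × Int :=
  (PySem.List.pyRange (k + 1) n 1).foldl (bInner k) s

def mapping_vector_to_matrix_py_alt (n : Int) : List (Int × Int × Int) :=
  ((PySem.List.pyRange 0 n 1).foldl (bOuter n) (PySem.Dict.empty, 0)).1.items

-- ===== PRECONDITION & SPEC =====
-- Pre_ restricts to the natural domain n ≥ 0 (n is a dimension count): for negative n, A's
-- pair count n*(n-1)//2 is positive and its j == n reset never fires, so A returns an
-- accidental single-row dict {0: (0, 1), ...} for a negative dimension, while B returns {}.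
def Pre_mapping_vector_to_matrix_py (n : Int) : Prop := 0 ≤ n
instance (n : Int) : Decidable (Pre_mapping_vector_to_matrix_py n) := by unfold Pre_mapping_vector_to_matrix_py; infer_instance

def pvWitness_mapping_vector_to_matrix_py : Int := 5

def Spec_mapping_vector_to_matrix_py (n : Int) (out : List (Int × Int × Int)) : Prop := out = mapping_vector_to_matrix_py_alt n
instance (n : Int) (out : List (Int × Int × Int)) : Decidable (Spec_mapping_vector_to_matrix_py n out) := by unfold Spec_mapping_vector_to_matrix_py; infer_instance

-- ===== CLAIM (what is proved, stated in full; the proofs are below) =====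
def Claim_equal_mapping_vector_to_matrix_py : Prop := ∀ (n : Int), Dom_mapping_vector_to_matrix_py n → Pre_mapping_vector_to_matrix_py n → Spec_mapping_vector_to_matrix_py n (mapping_vector_to_matrix_py n)

-- ===== LEMMAS AND PROOFS =====

-- r consecutive integer keys starting at i0
def consec (i0 : Int) : Nat → List Int
  | 0 => []
  | r + 1 => i0 :: consec (i0 + 1) r

-- the r items of one row: keys i0, i0+1, …, values (k, j), (k, j+1), …
def rowItems (k j i0 : Int) : Nat → List (Int × Int × Int)
  | 0 => []
  | r + 1 => (i0, k, j) :: rowItems k (j + 1) (i0 + 1) r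

-- the items of the last c rows of the triangle for size n (row n-c comes first, length c-1)
def tailItems (n : Int) : Nat → Int → List (Int × Int × Int)
  | 0, _ => []
  | c + 1, i0 =>
      rowItems (n - ((c + 1 : Nat) : Int)) (n - ((c + 1 : Nat) : Int) + 1) i0 c ++
        tailItems n c (i0 + (c : Int))

-- number of pairs in the last c rows
def S : Nat → Nat
  | 0 => 0
  | c + 1 => c + S c

lemma consec_append (x : Nat) : ∀ (y : Nat) (i0 : Int),
    consec i0 (x + y) = consec i0 x ++ consec (i0 + x) y := by
  induction x with
  | zero => intro y i0; simp [consec]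
  | succ x ih =>
    intro y i0
    have h1 : x + 1 + y = (x + y) + 1 := by omega
    rw [h1]
    simp only [consec, ih, List.cons_append]
    have h2 : i0 + 1 + (x : Int) = i0 + ((x + 1 : Nat) : Int) := by push_cast; ring
    rw [h2]

lemma pyRange_eq_consec : ∀ (r : Nat) (a b : Int), b - a = r →
    PySem.List.pyRange a b 1 = consec a r := by
  intro r
  induction r with
  | zero =>
    intro a b h
    simp [consec, PySem.List.pyRange]
    omega
  | succ r ih =>
    intro a b h
    rw [PySem.List.pyRange_one_cons (by omega), ih (a + 1) b (by omega)]
    rfl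

lemma mem_keys_rowItems : ∀ (r : Nat) (k j i0 x : Int),
    x ∈ (rowItems k j i0 r).map (·.1) → x < i0 + r := by
  intro r
  induction r with
  | zero => intro k j i0 x h; simp [rowItems] at h
  | succ r ih =>
    intro k j i0 x h
    simp only [rowItems, List.map_cons, List.mem_cons] at h
    rcases h with h | h
    · omega
    · have := ih k (j + 1) (i0 + 1) x h
      omega

lemma contains_false_of_keys_lt (d : PySem.Dict Int (Int × Int)) (i0 : Int)
    (h : ∀ x ∈ d.keys, x < i0) : d.contains i0 = false := by
  cases hcc : d.contains i0 with
  | false => rfl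
  | true =>
    have hmem : i0 ∈ d.keys := (PySem.Dict.contains_iff_mem_keys d i0).1 hcc
    exact absurd (h i0 hmem) (by omega)

lemma aRow (n : Int) : ∀ (r : Nat), 0 < r → ∀ (d : PySem.Dict Int (Int × Int)) (k j i0 : Int),
    j + r = n → (∀ x ∈ d.keys, x < i0) →
    ∃ d', List.foldl (aStep n) (d, k, j) (consec i0 r) = (d', k + 1, k + 2) ∧
      d'.items = d.items ++ rowItems k j i0 r := by
  intro r
  induction r with
  | zero => intro h; omega
  | succ r ih =>
    intro _ d k j i0 hj hk
    have hfresh := contains_false_of_keys_lt d i0 hk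
    have hitems := PySem.Dict.items_insert_of_not_contains (d := d) (k := i0) (v := (k, j)) hfresh
    cases r with
    | zero =>
      refine ⟨d.insert i0 (k, j), ?_, ?_⟩
      · have hc : consec i0 1 = [i0] := rfl
        rw [hc, List.foldl_cons, List.foldl_nil]
        simp only [aStep]
        rw [if_pos (by omega)]
      · simpa [rowItems] using hitems
    | succ r' =>
      have hc : consec i0 (r' + 1 + 1) = i0 :: consec (i0 + 1) (r' + 1) := rfl
      have ha : aStep n (d, k, j) i0 = (d.insert i0 (k, j), k, j + 1) := by
        simp only [aStep]
        rw [if_neg (by omega)]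
      have hk' : ∀ x ∈ (d.insert i0 (k, j)).keys, x < i0 + 1 := by
        intro x hx
        rcases (PySem.Dict.mem_keys_insert (d := d) (k := i0) (k' := x) (v := (k, j))).1 hx with h | h
        · omega
        · have := hk x h; omega
      obtain ⟨d', hd', hitems'⟩ := ih (by omega) (d.insert i0 (k, j)) k (j + 1) (i0 + 1)
        (by push_cast at hj ⊢; omega) hk'
      refine ⟨d', ?_, ?_⟩
      · rw [hc, List.foldl_cons, ha, hd']
      · rw [hitems', hitems]
        simp [rowItems]

lemma aAll (n : Int) : ∀ (c : Nat), ∀ (d : PySem.Dict Int (Int × Int)) (i0 : Int),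
    (∀ x ∈ d.keys, x < i0) →
    (List.foldl (aStep n) (d, n - (c : Int), n - (c : Int) + 1) (consec i0 (S c))).1.items =
      d.items ++ tailItems n c i0 := by
  intro c
  induction c with
  | zero => intro d i0 _; simp [S, consec, tailItems]
  | succ c ih =>
    intro d i0 hk
    cases c with
    | zero => simp [S, consec, tailItems, rowItems]
    | succ c' =>
      have hsplit : S (c' + 1 + 1) = (c' + 1) + S (c' + 1) := rfl
      rw [hsplit, consec_append, List.foldl_append]
      obtain ⟨d', hd', hitems'⟩ := aRow n (c' + 1) (by omega) d (n - ((c' + 1 + 1 : Nat) : Int))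
        (n - ((c' + 1 + 1 : Nat) : Int) + 1) i0 (by push_cast; ring) hk
      rw [hd']
      have hst : (n - ((c' + 1 + 1 : Nat) : Int) + 1 : Int) = n - ((c' + 1 : Nat) : Int) := by
        push_cast; ring
      have hst2 : (n - ((c' + 1 + 1 : Nat) : Int) + 2 : Int) = n - ((c' + 1 : Nat) : Int) + 1 := by
        push_cast; ring
      rw [hst, hst2]
      have hk' : ∀ x ∈ d'.keys, x < i0 + ((c' + 1 : Nat) : Int) := by
        intro x hx
        have hkeys : d'.keys = d.keys ++
            (rowItems (n - ((c' + 1 + 1 : Nat) : Int)) (n - ((c' + 1 + 1 : Nat) : Int) + 1) i0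
              (c' + 1)).map (·.1) := by
          simp only [PySem.Dict.keys, hitems', List.map_append]
        rw [hkeys] at hx
        rcases List.mem_append.1 hx with h | h
        · have := hk x h; omega
        · exact mem_keys_rowItems (c' + 1) _ _ i0 x h
      have hih := ih d' (i0 + ((c' + 1 : Nat) : Int)) hk'
      rw [hih, hitems']
      simp only [tailItems, List.append_assoc]

lemma bRow (k : Int) : ∀ (r : Nat) (d : PySem.Dict Int (Int × Int)) (j i0 : Int),
    (∀ x ∈ d.keys, x < i0) →
    ∃ d', List.foldl (bInner k) (d, i0) (consec j r) = (d', i0 + (r : Int)) ∧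
      d'.items = d.items ++ rowItems k j i0 r ∧ (∀ x ∈ d'.keys, x < i0 + (r : Int)) := by
  intro r
  induction r with
  | zero =>
    intro d j i0 hk
    exact ⟨d, by simp [consec], by simp [rowItems], by simpa using hk⟩
  | succ r ih =>
    intro d j i0 hk
    have hfresh := contains_false_of_keys_lt d i0 hk
    have hitems := PySem.Dict.items_insert_of_not_contains (d := d) (k := i0) (v := (k, j)) hfresh
    have hk' : ∀ x ∈ (d.insert i0 (k, j)).keys, x < i0 + 1 := by
      intro x hx
      rcases (PySem.Dict.mem_keys_insert (d := d) (k := i0) (k' := x) (v := (k, j))).1 hx with h | h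
      · omega
      · have := hk x h; omega
    obtain ⟨d', hd', hitems', hkeys'⟩ := ih (d.insert i0 (k, j)) (j + 1) (i0 + 1) hk'
    refine ⟨d', ?_, ?_, ?_⟩
    · have hc : consec j (r + 1) = j :: consec (j + 1) r := rfl
      rw [hc, List.foldl_cons]
      have hb : bInner k (d, i0) j = (d.insert i0 (k, j), i0 + 1) := rfl
      rw [hb, hd']
      have : i0 + 1 + (r : Int) = i0 + ((r + 1 : Nat) : Int) := by push_cast; ring
      rw [this]
    · rw [hitems', hitems]
      simp [rowItems]
    · intro x hx
      have := hkeys' x hx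
      push_cast at this ⊢
      omega

lemma bAll (n : Int) : ∀ (c : Nat), ∀ (d : PySem.Dict Int (Int × Int)) (i0 : Int),
    (∀ x ∈ d.keys, x < i0) →
    (List.foldl (bOuter n) (d, i0) (consec (n - (c : Int)) c)).1.items =
      d.items ++ tailItems n c i0 := by
  intro c
  induction c with
  | zero => intro d i0 _; simp [consec, tailItems]
  | succ c ih =>
    intro d i0 hk
    have hcons : consec (n - ((c + 1 : Nat) : Int)) (c + 1) =
        (n - ((c + 1 : Nat) : Int)) :: consec (n - (c : Int)) c := by
      have h1 : (n - ((c + 1 : Nat) : Int)) + 1 = n - (c : Int) := by push_cast; ring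
      simp only [consec]
      rw [h1]
    rw [hcons, List.foldl_cons]
    have hrange : PySem.List.pyRange (n - ((c + 1 : Nat) : Int) + 1) n 1 =
        consec (n - ((c + 1 : Nat) : Int) + 1) c :=
      pyRange_eq_consec c _ n (by push_cast; ring)
    obtain ⟨d', hd', hitems', hkeys'⟩ :=
      bRow (n - ((c + 1 : Nat) : Int)) c d (n - ((c + 1 : Nat) : Int) + 1) i0 hk
    have hb : bOuter n (d, i0) (n - ((c + 1 : Nat) : Int)) = (d', i0 + (c : Int)) := by
      simp only [bOuter]
      rw [hrange, hd']
    rw [hb]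
    have hih := ih d' (i0 + (c : Int)) hkeys'
    rw [hih, hitems']
    simp only [tailItems, List.append_assoc]

lemma twoS : ∀ N : Nat, (2 * S N : Int) = N * (N - 1) := by
  intro N
  induction N with
  | zero => simp [S]
  | succ c ih =>
    simp only [S]
    push_cast at ih ⊢
    linear_combination ih

lemma n_pairs_eq (n : Int) (h : 0 ≤ n) :
    PySem.Int.floordiv (n * (n - 1)) 2 = ((S n.toNat : Nat) : Int) := by
  have hn : (n.toNat : Int) = n := Int.toNat_of_nonneg h
  have h2 : n * (n - 1) = 2 * ((S n.toNat : Nat) : Int) := by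
    rw [twoS, hn]
  rw [h2, PySem.Int.floordiv_eq_ediv_of_pos (by omega)]
  exact Int.mul_ediv_cancel_left _ (by omega)

lemma empty_keys_lt : ∀ x ∈ (PySem.Dict.empty : PySem.Dict Int (Int × Int)).keys, x < (0 : Int) := by
  intro x hx
  simp [PySem.Dict.keys_empty] at hx

-- ===== VERDICT (by name: the statement is the Claim_ definition above) =====
theorem mapping_vector_to_matrix_py_spec : Claim_equal_mapping_vector_to_matrix_py := by
  intro n _ hpre
  have h0n : (0 : Int) ≤ n := hpre
  show mapping_vector_to_matrix_py n = mapping_vector_to_matrix_py_alt n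
  simp only [mapping_vector_to_matrix_py, mapping_vector_to_matrix_py_alt]
  rw [n_pairs_eq n h0n,
    pyRange_eq_consec (S n.toNat) 0 _ (by omega),
    pyRange_eq_consec n.toNat 0 n (by omega)]
  have hA := aAll n n.toNat PySem.Dict.empty 0 empty_keys_lt
  have hB := bAll n n.toNat PySem.Dict.empty 0 empty_keys_lt
  rw [show n - (n.toNat : Int) = 0 from by omega] at hA hB
  rw [show (0 : Int) + 1 = 1 from by norm_num] at hA
  rw [hA, hB]
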